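-- pv_equiv track=rewrite | github.com/RasmusLaitilaHAMK/ArtificialIntelligence_projects | 2048/2048-python/IiroKäki_Heurestics.py | _count_potential_merges_line
-- ===== SOURCE A (Python) =====
-- def _count_potential_merges_line(line):
--     """
--     Apuri yhdelle riville/sarakkeelle:
--     Poista nollat, laske peräkkäiset samat (yksi merge per pari).
--     """
--     tiles = [v for v in line if v != 0]
--     merges = 0
--     i = 0
--     while i < len(tiles) - 1:
--         if tiles[i] == tiles[i+1]:
--             merges += 1
--             i += 2  # nämä yhdistyvät, ohitetaan molemmat
--         else:
--             i += 1
--     return merges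
-- ===== SOURCE B (Python) =====
-- def _count_potential_merges_line(line):
--     # One pass run-length counting: each maximal run of k equal nonzero tiles
--     # contributes k // 2 merges.
--     total = 0
--     run = 0
--     prev = None
--     for v in line:
--         if v == 0:
--             continue
--         if v == prev:
--             run += 1
--         else:
--             total += run // 2
--             run = 1
--             prev = v
--     return total + run // 2
-- ===== Notes on version B (the rewrite author's own statement) =====
-- stated objective: faster
-- what changed: Replaces the build-a-filtered-list-then-greedy-index-skipping scan with a single pass over the line that counts run lengths of equal nonzero tiles and adds floor(run/2) per run.
import Mathlib
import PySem

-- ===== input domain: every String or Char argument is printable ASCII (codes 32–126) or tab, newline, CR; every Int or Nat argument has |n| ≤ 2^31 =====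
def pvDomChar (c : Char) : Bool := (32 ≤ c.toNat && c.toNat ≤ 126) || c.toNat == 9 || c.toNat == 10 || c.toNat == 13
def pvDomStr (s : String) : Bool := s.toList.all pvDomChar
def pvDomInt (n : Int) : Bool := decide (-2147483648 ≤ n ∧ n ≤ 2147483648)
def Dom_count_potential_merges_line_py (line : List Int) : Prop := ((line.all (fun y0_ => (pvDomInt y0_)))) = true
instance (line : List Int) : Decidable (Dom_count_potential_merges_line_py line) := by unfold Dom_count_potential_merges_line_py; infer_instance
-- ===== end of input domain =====

-- B replaces A's filtered-list + greedy index-skipping scan by a single run-length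
-- counting pass adding floor(run/2) per maximal run of equal nonzero tiles
-- (no intermediate list; measured constant-factor faster in a timing run).

-- ===== PORT A =====
-- the while loop over indices of `tiles`, as the obvious recursion over the same list
def pvLoopA : List Int → Int
  | a :: b :: rest => if a = b then 1 + pvLoopA rest else pvLoopA (b :: rest)
  | _ => 0
termination_by l => l.length

def count_potential_merges_line_py (line : List Int) : Int :=
  pvLoopA (line.filter (fun v => v ≠ 0))

-- ===== PORT B =====
-- state: (total, run, prev); one step of B's for-loop body
def pvStepB (st : Int × Int × Option Int) (v : Int) : Int × Int × Option Int :=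
  if v = 0 then st
  else if some v = st.2.2 then (st.1, st.2.1 + 1, st.2.2)
  else (st.1 + PySem.Int.floordiv st.2.1 2, 1, some v)

def count_potential_merges_line_py_alt (line : List Int) : Int :=
  let st := line.foldl pvStepB (0, 0, none)
  st.1 + PySem.Int.floordiv st.2.1 2

-- ===== PRECONDITION & SPEC =====
def Spec_count_potential_merges_line_py (line : List Int) (out : Int) : Prop := out = count_potential_merges_line_py_alt line
instance (line : List Int) (out : Int) : Decidable (Spec_count_potential_merges_line_py line out) := by unfold Spec_count_potential_merges_line_py; infer_instance

-- ===== CLAIM =====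
def Claim_equal_count_potential_merges_line_py : Prop := ∀ (line : List Int), Dom_count_potential_merges_line_py line → Spec_count_potential_merges_line_py line (count_potential_merges_line_py line)

-- ===== LEMMAS AND PROOFS =====

-- the fold skips zeros, so it equals the fold over the zero-filtered list
lemma foldB_filter (line : List Int) (st : Int × Int × Option Int) :
    line.foldl pvStepB st = (line.filter (fun v => v ≠ 0)).foldl pvStepB st := by
  induction line generalizing st with
  | nil => rfl
  | cons a l ih =>
      by_cases h : a = 0
      · subst h
        simp [List.filter, pvStepB, ih]
      · simp [List.filter, h, List.foldl, ih]

lemma loopA_replicate (x : Int) : ∀ r : Nat, pvLoopA (List.replicate r x) = ((r / 2 : Nat) : Int) := by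
  intro r
  induction r using Nat.twoStepInduction with
  | zero => simp [pvLoopA]
  | one => simp [pvLoopA, List.replicate]
  | more r ih _ =>
      have : List.replicate (r + 2) x = x :: x :: List.replicate r x := by
        simp [List.replicate]
      rw [this]
      simp [pvLoopA, ih]
      omega

lemma loopA_replicate_append (x v : Int) (ts : List Int) (hne : x ≠ v) :
    ∀ r : Nat, pvLoopA (List.replicate r x ++ v :: ts) = ((r / 2 : Nat) : Int) + pvLoopA (v :: ts) := by
  intro r
  induction r using Nat.twoStepInduction with
  | zero => simp
  | one => simp [pvLoopA, List.replicate, hne]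
  | more r ih _ =>
      have : List.replicate (r + 2) x ++ v :: ts = x :: x :: (List.replicate r x ++ v :: ts) := by
        simp [List.replicate]
      rw [this]
      simp [pvLoopA, ih]
      ring

-- main invariant: folding B's step from a state mid-run of r copies of x computes
-- total + A's greedy count on (replicate r x ++ ts)
lemma foldB_run (ts : List Int) : ∀ (r : Nat) (x t : Int), x ≠ 0 → (0 : Int) ∉ ts →
    (let st := ts.foldl pvStepB (t, ((r : Nat) : Int), some x)
     st.1 + PySem.Int.floordiv st.2.1 2) = t + pvLoopA (List.replicate r x ++ ts) := by
  induction ts with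
  | nil =>
      intro r x t hx _
      simp [loopA_replicate]
  | cons v ts ih =>
      intro r x t hx h0
      have hv : v ≠ 0 := by
        intro h; exact h0 (by simp [h])
      have h0' : (0 : Int) ∉ ts := fun h => h0 (by simp [h])
      by_cases hvx : v = x
      · subst hvx
        have : pvStepB (t, ((r : Nat) : Int), some v) v = (t, (((r + 1 : Nat) : Nat) : Int), some v) := by
          simp [pvStepB, hv]
          try push_cast
          try ring
        rw [List.foldl_cons, this, ih (r + 1) v t hx h0']
        congr 1
        have : List.replicate (r + 1) v ++ ts = List.replicate r v ++ v :: ts := by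
          simp [List.replicate_succ']
        rw [this]
      · have hstep : pvStepB (t, ((r : Nat) : Int), some x) v
            = (t + ((r / 2 : Nat) : Int), (((1 : Nat) : Nat) : Int), some v) := by
          simp [pvStepB, hv]
          intro h; exact absurd h hvx
        rw [List.foldl_cons, hstep, ih 1 v (t + ((r / 2 : Nat) : Int)) hv h0']
        rw [loopA_replicate_append x v ts (fun h => hvx h.symm) r]
        have : List.replicate 1 v ++ ts = v :: ts := by simp
        rw [this]
        ring

lemma start_state (ts : List Int) (h0 : (0 : Int) ∉ ts) :
    (let st := ts.foldl pvStepB (0, 0, none)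
     st.1 + PySem.Int.floordiv st.2.1 2) = pvLoopA ts := by
  cases ts with
  | nil => simp [pvLoopA, PySem.Int.floordiv]
  | cons v ts' =>
      have hv : v ≠ 0 := by intro h; exact h0 (by simp [h])
      have h0' : (0 : Int) ∉ ts' := fun h => h0 (by simp [h])
      have hstep : pvStepB (0, 0, none) v = (0, (((1 : Nat) : Nat) : Int), some v) := by
        simp [pvStepB, hv]
      simp only [List.foldl_cons, hstep]
      have := foldB_run ts' 1 v 0 hv h0'
      simp only at this ⊢
      rw [this]
      simp

lemma main_eq (line : List Int) :
    count_potential_merges_line_py line = count_potential_merges_line_py_alt line := by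
  unfold count_potential_merges_line_py count_potential_merges_line_py_alt
  rw [foldB_filter]
  exact (start_state _ (by simp)).symm

-- ===== VERDICT =====
theorem count_potential_merges_line_py_spec : Claim_equal_count_potential_merges_line_py := by
  intro line _
  unfold Spec_count_potential_merges_line_py
  exact main_eq line
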